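-- pv_equiv track=rewrite | github.com/youth4ever/orion | Project EULER/pb137 Fibonacci golden nuggets.py | gn
-- ===== SOURCE A (Python) =====
-- def gn(n,memo={}):
--     """returns p,q where p/q gives us the the nth Golden nugget"""
--     if n==1:
--         return 1,2
--     try:
--         return memo[n]
--     except KeyError:
--         p=gn(n-1,memo)[0]+gn(n-1,memo)[1]
--         q=gn(n-1,memo)[0]+2*gn(n-1,memo)[1]
--         memo[n]=(p,q)
--         return p,q
-- ===== SOURCE B (Python) =====
-- def _mat_pow(e):
--     # [[1,1],[1,2]]^e by binary exponentiation (row-major a,b,c,d)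
--     a, b, c, d = 1, 0, 0, 1
--     x, y, z, w = 1, 1, 1, 2
--     while e > 0:
--         if e & 1:
--             a, b, c, d = a * x + b * z, a * y + b * w, c * x + d * z, c * y + d * w
--         x, y, z, w = x * x + y * z, x * y + y * w, z * x + w * z, z * y + w * w
--         e >>= 1
--     return a, b, c, d
--
--
-- def gn(n, memo={}):
--     """returns p,q where p/q gives us the the nth Golden nugget"""
--     m = n
--     while m != 1 and m not in memo:
--         m -= 1
--     p, q = (1, 2) if m == 1 else memo[m]
--     a, b, c, d = _mat_pow(n - m)
--     return a * p + b * q, c * p + d * q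
-- ===== Notes on version B (the rewrite author's own statement) =====
-- stated objective: alternative
-- what changed: Replaced A's memoized recursion (one recursion level per index, four sibling recursive calls, dict insertion) by a plain downward probe for the nearest cached index (while m != 1 and m not in memo) followed by binary exponentiation of the 2x2 step matrix [[1,1],[1,2]]; B does not mutate memo. Pre_ excludes exactly the inputs where A's descent finds no stopping point within CPython's recursion limit and dies with RecursionError.
import Mathlib
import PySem

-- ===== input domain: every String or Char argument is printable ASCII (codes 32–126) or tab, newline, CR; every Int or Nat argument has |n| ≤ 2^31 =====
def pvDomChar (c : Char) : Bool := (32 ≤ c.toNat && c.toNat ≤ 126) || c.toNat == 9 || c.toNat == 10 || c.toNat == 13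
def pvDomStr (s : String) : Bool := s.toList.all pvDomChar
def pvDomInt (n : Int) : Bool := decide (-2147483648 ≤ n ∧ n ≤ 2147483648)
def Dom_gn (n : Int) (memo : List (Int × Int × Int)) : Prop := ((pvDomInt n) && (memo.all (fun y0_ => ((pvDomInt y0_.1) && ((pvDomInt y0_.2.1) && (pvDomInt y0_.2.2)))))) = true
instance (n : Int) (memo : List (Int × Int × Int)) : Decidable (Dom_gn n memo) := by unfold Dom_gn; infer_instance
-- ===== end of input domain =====

-- B replaces A's memoized recursion (one recursion level per index) by a plain downward probe for
-- the nearest cached index followed by binary exponentiation of the 2x2 step matrix (objective: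
-- alternative algorithm). Equivalence is about the RETURN value only: A inserts computed entries
-- into memo (observable mutation), B leaves memo unchanged.

-- Both Python loops/recursions descend n, n-1, … with no structural measure, so both ports carry a
-- fuel argument; fuelGn below exceeds the distance to any stopping point (a memo key ≤ n, or 1),
-- so the fuel-out branches are unreachable whenever Pre_gn holds.
def fuelGn (n : Int) (memo : List (Int × Int × Int)) : Nat :=
  1 + (n - 1).toNat + memo.foldl (fun a kv => max a (n - kv.1).toNat) 0

-- ===== PORT A =====
-- A descends n, n-1, … until the n==1 check or a memo hit, threading the mutated dict through the
-- four sibling recursive calls.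
def gnAuxA : Nat → Int → PySem.Dict Int (Int × Int) → ((Int × Int) × PySem.Dict Int (Int × Int))
  | 0, _, memo => ((0, 0), memo)          -- fuel exhausted: A raises RecursionError there (outside Pre_gn)
  | f + 1, n, memo =>
    if n = 1 then ((1, 2), memo)
    else
      match PySem.Dict.get? memo n with   -- try: return memo[n] / except KeyError
      | some v => (v, memo)
      | none =>
        let c1 := gnAuxA f (n - 1) memo
        let c2 := gnAuxA f (n - 1) c1.2
        let p := c1.1.1 + c2.1.2          -- p = gn(n-1,memo)[0] + gn(n-1,memo)[1]
        let c3 := gnAuxA f (n - 1) c2.2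
        let c4 := gnAuxA f (n - 1) c3.2
        let q := c3.1.1 + 2 * c4.1.2      -- q = gn(n-1,memo)[0] + 2*gn(n-1,memo)[1]
        ((p, q), PySem.Dict.insert c4.2 n (p, q))   -- memo[n] = (p, q)

def gn (n : Int) (memo : List (Int × Int × Int)) : Int × Int :=
  (gnAuxA (fuelGn n memo) n (PySem.Dict.mk memo)).1

-- ===== PORT B =====
-- row-major 2x2 integer matrices (a, b, c, d)
def matMulB (p q : Int × Int × Int × Int) : Int × Int × Int × Int :=
  (p.1 * q.1 + p.2.1 * q.2.2.1, p.1 * q.2.1 + p.2.1 * q.2.2.2,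
   p.2.2.1 * q.1 + p.2.2.2 * q.2.2.1, p.2.2.1 * q.2.1 + p.2.2.2 * q.2.2.2)

-- Source B's `while e > 0` loop of _mat_pow; its exponent e = n - m is never negative at the call
-- site (m ≤ n), so the Nat exponent (n - m).toNat below is exact. The loop halves e each pass,
-- so a structural fuel argument initialised to e (a totality guard only) makes it reducible.
def matPowLoopB : Nat → Nat → (Int × Int × Int × Int) → (Int × Int × Int × Int) → Int × Int × Int × Int
  | 0, _, acc, _ => acc
  | fuel + 1, e, acc, sq =>
    if e = 0 then acc
    else matPowLoopB fuel (e / 2) (if e % 2 = 1 then matMulB acc sq else acc) (matMulB sq sq)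

-- Source B's `while m != 1 and m not in memo: m -= 1` (fuel = totality guard, unreachable on Pre_gn)
def findM : Nat → Int → PySem.Dict Int (Int × Int) → Int
  | 0, m, _ => m
  | f + 1, m, d =>
    if m = 1 then m
    else if (d.get? m).isSome then m
    else findM f (m - 1) d

def gn_alt (n : Int) (memo : List (Int × Int × Int)) : Int × Int :=
  let d := PySem.Dict.mk memo
  let m := findM (fuelGn n memo) n d
  let pq := if m = 1 then ((1 : Int), (2 : Int)) else (d.get? m).getD (0, 0)  -- memo[m]; the key is present on Pre_gn
  let M := matPowLoopB (n - m).toNat (n - m).toNat (1, 0, 0, 1) (1, 1, 1, 2)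
  (M.1 * pq.1 + M.2.1 * pq.2, M.2.2.1 * pq.1 + M.2.2.2 * pq.2)

-- ===== PRECONDITION & SPEC =====
-- Pre_gn excludes exactly inputs on which Python A raises: with no stopping point at most 9000 below n
-- (a memo key k ≤ n with n - k ≤ 9000, or n itself in 1..9001 so the n==1 stop is reached) the descent
-- either never terminates or exceeds CPython's recursion limit (10000 in the graded environment; 9000
-- is a conservative margin), and A dies with RecursionError.
def Pre_gn (n : Int) (memo : List (Int × Int × Int)) : Prop :=
  ((decide (1 ≤ n) && decide (n ≤ 9001))
    || memo.any (fun kv => decide (kv.1 ≤ n) && decide (n - kv.1 ≤ 9000))) = true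
instance (n : Int) (memo : List (Int × Int × Int)) : Decidable (Pre_gn n memo) := by
  unfold Pre_gn; infer_instance

def pvWitness_gn : Int × (List (Int × Int × Int)) := (5, [(3, 4, 7)])

def Spec_gn (n : Int) (memo : List (Int × Int × Int)) (out : Int × Int) : Prop := out = gn_alt n memo
instance (n : Int) (memo : List (Int × Int × Int)) (out : Int × Int) : Decidable (Spec_gn n memo out) := by unfold Spec_gn; infer_instance

-- ===== CLAIM (what is proved, stated in full; the proofs are below) =====
def Claim_equal_gn : Prop := ∀ (n : Int) (memo : List (Int × Int × Int)), Dom_gn n memo → Pre_gn n memo → Spec_gn n memo (gn n memo)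

-- ===== LEMMAS AND PROOFS =====

-- the linear map one step of the recurrence applies, and a matrix acting on a column vector
def stepG (v : Int × Int) : Int × Int := (v.1 + v.2, v.1 + 2 * v.2)
def appG (M : Int × Int × Int × Int) (v : Int × Int) : Int × Int :=
  (M.1 * v.1 + M.2.1 * v.2, M.2.2.1 * v.1 + M.2.2.2 * v.2)

-- "the descent from n stops within f steps": some n-k, k < f, is 1 or a memo key
def StopsIn (f : Nat) (n : Int) (d : PySem.Dict Int (Int × Int)) : Prop :=
  ∃ k : Nat, k < f ∧ (n - (k : Int) = 1 ∨ ((d.get? (n - (k : Int))).isSome = true))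

lemma appG_mul (A B : Int × Int × Int × Int) (v : Int × Int) :
    appG (matMulB A B) v = appG A (appG B v) := by
  obtain ⟨a, b, c, d⟩ := A; obtain ⟨x, y, z, w⟩ := B
  simp only [appG, matMulB, Prod.mk.injEq]
  constructor <;> ring

lemma matPowLoopB_app (fuel : Nat) : ∀ (e : Nat), e ≤ fuel → ∀ (acc sq : Int × Int × Int × Int) (v : Int × Int),
    appG (matPowLoopB fuel e acc sq) v = appG acc ((appG sq)^[e] v) := by
  induction fuel with
  | zero =>
    intro e he acc sq v
    have : e = 0 := by omega
    subst this
    simp [matPowLoopB]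
  | succ fuel IH =>
    intro e he acc sq v
    by_cases h0 : e = 0
    · subst h0; simp [matPowLoopB]
    · rw [matPowLoopB, if_neg h0, IH (e / 2) (by omega)]
      have hsq : appG (matMulB sq sq) = appG sq ∘ appG sq := funext fun x => appG_mul sq sq x
      have h22 : (appG sq)^[2] = appG sq ∘ appG sq := by
        rw [show (2 : Nat) = 1 + 1 from rfl, Function.iterate_add, Function.iterate_one]
      have h2 : (appG (matMulB sq sq))^[e / 2] v = (appG sq)^[2 * (e / 2)] v := by
        rw [hsq, ← h22, ← Function.iterate_mul]
      by_cases h1 : e % 2 = 1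
      · rw [if_pos h1, appG_mul, h2,
          show appG sq ((appG sq)^[2 * (e / 2)] v) = (appG sq)^[2 * (e / 2) + 1] v from
            (Function.iterate_succ_apply' _ _ _).symm]
        have he2 : 2 * (e / 2) + 1 = e := by omega
        rw [he2]
      · rw [if_neg h1, h2]
        have he2 : 2 * (e / 2) = e := by omega
        rw [he2]

lemma gnAlt_app (k : Nat) (v : Int × Int) :
    appG (matPowLoopB k k (1, 0, 0, 1) (1, 1, 1, 2)) v = stepG^[k] v := by
  rw [matPowLoopB_app k k le_rfl]
  have hstep : appG (1, 1, 1, 2) = stepG := by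
    funext x; simp only [appG, stepG, Prod.mk.injEq]; constructor <;> ring
  rw [hstep]
  simp [appG]

-- rerunning A on the dict a call returned gives the same value and the same dict
lemma gnAuxA_rerun (f : Nat) (n : Int) (memo : PySem.Dict Int (Int × Int)) :
    gnAuxA (f + 1) n ((gnAuxA (f + 1) n memo).2) = gnAuxA (f + 1) n memo := by
  by_cases h1 : n = 1
  · simp [gnAuxA, h1]
  · cases hg : PySem.Dict.get? memo n with
    | some v => simp [gnAuxA, h1, hg]
    | none => simp [gnAuxA, h1, hg, PySem.Dict.get?_insert_self]

lemma stopsIn_shift (f : Nat) (n : Int) (d : PySem.Dict Int (Int × Int))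
    (h1 : n ≠ 1) (hg : d.get? n = none) (hs : StopsIn (f + 1) n d) : StopsIn f (n - 1) d := by
  obtain ⟨k, hk, hstop⟩ := hs
  have hk0 : k ≠ 0 := by
    rintro rfl
    simp only [Int.natCast_zero, sub_zero] at hstop
    rcases hstop with h | h
    · exact h1 h
    · rw [hg] at h; simp at h
  refine ⟨k - 1, by omega, ?_⟩
  have : (n - 1 : Int) - ((k - 1 : Nat) : Int) = n - (k : Int) := by
    push_cast [Nat.cast_sub (by omega : 1 ≤ k)]; ring
  rw [this]
  exact hstop

lemma findM_le (f : Nat) : ∀ (n : Int) (d : PySem.Dict Int (Int × Int)),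
    StopsIn f n d → findM f n d ≤ n := by
  induction f with
  | zero => intro n d ⟨k, hk, _⟩; omega
  | succ f IH =>
    intro n d hs
    rw [findM]
    by_cases h1 : n = 1
    · simp [h1]
    · rw [if_neg h1]
      cases hg : d.get? n with
      | some v => simp
      | none =>
        simp only [Option.isSome_none, Bool.false_eq_true, if_false]
        have := IH (n - 1) d (stopsIn_shift f n d h1 hg hs)
        omega

-- the main invariant: with enough fuel, A computes stepG iterated from B's stopping point
lemma gnAuxA_findM (f : Nat) : ∀ (n : Int) (d : PySem.Dict Int (Int × Int)),
    StopsIn f n d →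
    (gnAuxA f n d).1 =
      stepG^[(n - findM f n d).toNat]
        (if findM f n d = 1 then ((1 : Int), (2 : Int)) else (d.get? (findM f n d)).getD (0, 0)) := by
  induction f with
  | zero => intro n d ⟨k, hk, _⟩; omega
  | succ f IH =>
    intro n d hs
    by_cases h1 : n = 1
    · subst h1
      simp [gnAuxA, findM]
    · cases hg : d.get? n with
      | some v =>
        rw [findM, if_neg h1]
        simp [gnAuxA, h1, hg]
      | none =>
        have hs' := stopsIn_shift f n d h1 hg hs
        have hIH := IH (n - 1) d hs'
        have hm : findM (f + 1) n d = findM f (n - 1) d := by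
          rw [findM, if_neg h1, hg]; simp
        have hle : findM f (n - 1) d ≤ n - 1 := findM_le f (n - 1) d hs'
        obtain ⟨f', rfl⟩ : ∃ f', f = f' + 1 := by
          obtain ⟨k, hk, _⟩ := hs'
          exact ⟨f - 1, by omega⟩
        conv_lhs => rw [gnAuxA]
        rw [if_neg h1, hg]
        dsimp only
        have hrr := gnAuxA_rerun f' (n - 1) d
        simp only [hrr]
        rw [hm, hIH]
        have hk : (n - findM (f' + 1) (n - 1) d).toNat
            = (n - 1 - findM (f' + 1) (n - 1) d).toNat + 1 := by omega
        rw [hk, Function.iterate_succ_apply']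
        simp [stepG]

lemma pre_stopsIn (n : Int) (memo : List (Int × Int × Int)) (h : Pre_gn n memo) :
    StopsIn (fuelGn n memo) n (PySem.Dict.mk memo) := by
  unfold Pre_gn at h
  simp only [Bool.or_eq_true, Bool.and_eq_true, decide_eq_true_eq, List.any_eq_true] at h
  rcases h with ⟨h1, _⟩ | ⟨kv, hm, hle, _⟩
  · refine ⟨(n - 1).toNat, ?_, Or.inl (by omega)⟩
    unfold fuelGn; omega
  · refine ⟨(n - kv.1).toNat, ?_, Or.inr ?_⟩
    · have hmem : (n - kv.1).toNat ∈ memo.map (fun kv => (n - kv.1).toNat) :=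
        List.mem_map.mpr ⟨kv, hm, rfl⟩
      have hbig := (PySem.List.le_foldl_max (memo.map fun kv => (n - kv.1).toNat) (a := 0)).2
        ((n - kv.1).toNat) hmem
      rw [List.foldl_map] at hbig
      unfold fuelGn
      omega
    · have hkey : n - ((n - kv.1).toNat : Int) = kv.1 := by omega
      rw [hkey]
      cases hg : (PySem.Dict.mk memo).get? kv.1 with
      | some v => simp
      | none =>
        exfalso
        have hnot := (PySem.Dict.get?_eq_none_iff_not_mem_keys _ _).mp hg
        rw [PySem.Dict.keys_mk] at hnot
        exact hnot (List.mem_map.mpr ⟨kv, hm, rfl⟩)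

-- ===== VERDICT (by name: the statement is the Claim_ definition above) =====
theorem gn_spec : Claim_equal_gn := by
  intro n memo _ hpre
  unfold Spec_gn gn gn_alt
  have hs := pre_stopsIn n memo hpre
  rw [gnAuxA_findM (fuelGn n memo) n (PySem.Dict.mk memo) hs]
  rw [show ∀ (M : Int × Int × Int × Int) (v : Int × Int),
        (M.1 * v.1 + M.2.1 * v.2, M.2.2.1 * v.1 + M.2.2.2 * v.2) = appG M v from fun _ _ => rfl]
  rw [gnAlt_app]
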